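-- pv_equiv track=rewrite | github.com/matejbolta/advent-of-code-2020 | 2020/src/day16.py | ustrezna_polja
-- ===== SOURCE A (Python) =====
-- def ustrezna_polja(tickets, i, fields):
--   stevila = []
--   for ticket in tickets:
--     stevila.append(ticket[i])
--   valid_fields = []
--   for field in fields:
--     field_ok = True
--     for st in stevila:
--       if not st in field[1]:
--         field_ok = False
--         break
--     if field_ok:
--       valid_fields.append(field)
--   return [polje[0] for polje in valid_fields]
-- ===== SOURCE B (Python) =====
-- def ustrezna_polja(tickets, i, fields):
--   candidates = list(fields)
--   for ticket in tickets:
--     v = ticket[i]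
--     candidates = [f for f in candidates if v in f[1]]
--   return [f[0] for f in candidates]
-- ===== Notes on version B (the rewrite author's own statement) =====
-- stated objective: alternative
-- what changed: Inverted the loop nesting: instead of testing each field independently against the full column (with a break), B iterates tickets once and maintains a shrinking candidate list of fields, filtering out fields whose range misses the current value.
import Mathlib
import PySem

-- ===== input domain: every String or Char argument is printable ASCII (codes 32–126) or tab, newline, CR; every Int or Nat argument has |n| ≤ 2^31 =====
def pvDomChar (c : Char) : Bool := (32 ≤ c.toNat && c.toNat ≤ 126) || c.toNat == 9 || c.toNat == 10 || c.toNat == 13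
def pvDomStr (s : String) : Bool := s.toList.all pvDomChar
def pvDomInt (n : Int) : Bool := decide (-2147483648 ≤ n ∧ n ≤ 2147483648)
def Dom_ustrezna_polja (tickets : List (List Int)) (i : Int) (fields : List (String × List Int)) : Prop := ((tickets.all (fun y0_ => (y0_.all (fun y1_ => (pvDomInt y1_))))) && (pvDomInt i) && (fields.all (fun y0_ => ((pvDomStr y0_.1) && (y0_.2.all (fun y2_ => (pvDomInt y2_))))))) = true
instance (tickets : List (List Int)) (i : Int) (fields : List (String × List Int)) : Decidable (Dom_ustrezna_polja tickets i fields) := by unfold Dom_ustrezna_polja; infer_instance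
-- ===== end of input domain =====

-- ===== PORT A =====
-- inner 'for st in stevila: if not st in field[1]: field_ok = False; break' — transliterated with the break as early return
def pvCheck (stevila : List Int) (rng : List Int) : Bool :=
  match stevila with
  | [] => true
  | st :: rest => if !(rng.contains st) then false else pvCheck rest rng

def ustrezna_polja (tickets : List (List Int)) (i : Int) (fields : List (String × List Int)) : List String :=
  let stevila := tickets.foldl (fun acc t => acc ++ [PySem.List.pyGetD t i 0]) []
  let valid_fields := fields.foldl (fun acc f => if pvCheck stevila f.2 then acc ++ [f] else acc) []
  valid_fields.map (fun polje => polje.1)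

-- ===== PORT B =====
-- B iterates tickets once, maintaining a shrinking candidate list of fields
def ustrezna_polja_alt (tickets : List (List Int)) (i : Int) (fields : List (String × List Int)) : List String :=
  let candidates := tickets.foldl (fun c t => c.filter (fun f => f.2.contains (PySem.List.pyGetD t i 0))) fields
  candidates.map (fun f => f.1)

-- ===== PRECONDITION & SPEC =====
-- Pre_ excludes exactly the inputs where Python A raises IndexError: ticket[i] must be in range for every ticket
def Pre_ustrezna_polja (tickets : List (List Int)) (i : Int) (fields : List (String × List Int)) : Prop :=
  ∀ t ∈ tickets, PySem.Raise.InRange t.length i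
instance (tickets : List (List Int)) (i : Int) (fields : List (String × List Int)) : Decidable (Pre_ustrezna_polja tickets i fields) := by unfold Pre_ustrezna_polja; infer_instance
def pvWitness_ustrezna_polja : List (List Int) × Int × (List (String × List Int)) := ([[1, 5], [2, 5]], 0, [("row", [1, 2, 3]), ("seat", [2, 5])])
def Spec_ustrezna_polja (tickets : List (List Int)) (i : Int) (fields : List (String × List Int)) (out : List String) : Prop := out = ustrezna_polja_alt tickets i fields
instance (tickets : List (List Int)) (i : Int) (fields : List (String × List Int)) (out : List String) : Decidable (Spec_ustrezna_polja tickets i fields out) := by unfold Spec_ustrezna_polja; infer_instance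

-- ===== CLAIM (what is proved, stated in full; the proofs are below) =====
def Claim_equal_ustrezna_polja : Prop := ∀ (tickets : List (List Int)) (i : Int) (fields : List (String × List Int)), Dom_ustrezna_polja tickets i fields → Pre_ustrezna_polja tickets i fields → Spec_ustrezna_polja tickets i fields (ustrezna_polja tickets i fields)

-- ===== LEMMAS AND PROOFS =====

theorem pvCheck_eq_all (stevila rng : List Int) : pvCheck stevila rng = stevila.all (fun st => rng.contains st) := by
  induction stevila with
  | nil => simp [pvCheck]
  | cons st rest ih =>
    simp only [pvCheck, List.all_cons, ih]
    by_cases h : rng.contains st <;> simp_all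

theorem foldl_filter_eq_filter_all {α β : Type} (ts : List β) (g : β → Int) (fs : List (α × List Int)) :
    ts.foldl (fun c t => c.filter (fun f => f.2.contains (g t))) fs
      = fs.filter (fun f => ts.all (fun t => f.2.contains (g t))) := by
  induction ts generalizing fs with
  | nil => simp
  | cons t rest ih =>
    simp only [List.foldl_cons, ih, List.filter_filter, List.all_cons]
    congr 1
    funext f
    rw [Bool.and_comm]

theorem pvWitness_ok : Dom_ustrezna_polja pvWitness_ustrezna_polja.1 pvWitness_ustrezna_polja.2.1 pvWitness_ustrezna_polja.2.2 ∧ Pre_ustrezna_polja pvWitness_ustrezna_polja.1 pvWitness_ustrezna_polja.2.1 pvWitness_ustrezna_polja.2.2 := by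
  constructor <;> decide

-- ===== VERDICT (by name: the statement is the Claim_ definition above) =====
theorem ustrezna_polja_spec : Claim_equal_ustrezna_polja := by
  intro tickets i fields _ _
  unfold Spec_ustrezna_polja ustrezna_polja ustrezna_polja_alt
  simp only [PySem.List.foldl_append_singleton_eq_map, PySem.List.foldl_append_if_eq_filter,
      foldl_filter_eq_filter_all tickets (fun t => PySem.List.pyGetD t i 0) fields,
      List.nil_append]
  congr 1
  apply List.filter_congr
  intro f _
  rw [pvCheck_eq_all, List.all_map]
  rfl
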